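-- pv_equiv track=rewrite | github.com/ep-eaglepoint-ai/bd_datasets_003 | wsi1tk-minimum-slot-schedule/repository_after/solution.py | calculate_minimum_slots
-- ===== SOURCE A (Python) =====
-- from collections import Counter
-- from typing import Dict, Iterable, List, Tuple, Union
--
-- def calculate_minimum_slots(tasks: List[Union[str, int]], n: int) -> int:
--
--     if not tasks:
--         return 0
--
--     if n == 0:
--         return len(tasks)
--
--     counter = Counter(tasks)
--     frequencies = list(counter.values())
--     max_freq = max(frequencies)
--     num_max_tasks = sum(1 for freq in frequencies if freq == max_freq)
--
--     # Classic task scheduler formula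
--     min_slots = (max_freq - 1) * (n + 1) + num_max_tasks
--
--     # Must be at least the number of tasks
--     return max(len(tasks), min_slots)
-- ===== SOURCE B (Python) =====
-- def calculate_minimum_slots(tasks, n):
--     counts = {}
--     for t in tasks:
--         counts[t] = counts.get(t, 0) + 1
--     if not counts:
--         return 0
--     max_freq = max(counts.values())
--     idle = (max_freq - 1) * (n + 1)
--     for c in counts.values():
--         idle -= min(c, max_freq - 1)
--     return len(tasks) + max(0, idle)
-- ===== Notes on version B (the rewrite author's own statement) =====
-- stated objective: alternative
-- what changed: Replaces the max-frequency/num-max closed formula (with its special n==0 branch and final max against len) by idle-slot accounting: one counting pass, then subtract min(count, max_freq-1) for every distinct task from the (max_freq-1)*(n+1) frame and add the surviving idle slots to len(tasks).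
import Mathlib
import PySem

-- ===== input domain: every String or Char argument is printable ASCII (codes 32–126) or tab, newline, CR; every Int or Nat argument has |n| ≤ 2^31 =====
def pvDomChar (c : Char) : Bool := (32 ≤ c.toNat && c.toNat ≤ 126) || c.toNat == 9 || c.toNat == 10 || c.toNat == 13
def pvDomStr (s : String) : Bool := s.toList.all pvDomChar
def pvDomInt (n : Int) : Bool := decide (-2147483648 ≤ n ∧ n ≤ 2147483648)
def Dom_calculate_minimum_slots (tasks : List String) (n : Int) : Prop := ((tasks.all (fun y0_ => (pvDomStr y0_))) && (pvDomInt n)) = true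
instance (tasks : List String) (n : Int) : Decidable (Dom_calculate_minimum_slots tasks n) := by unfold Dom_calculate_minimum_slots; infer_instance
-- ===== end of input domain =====

-- B replaces A's max-frequency/num-max closed formula (with its special n == 0 branch and the
-- final max against len) by idle-slot accounting in a single pass over the counts; same cost.

-- ===== PORT A =====
def calculate_minimum_slots (tasks : List String) (n : Int) : Int :=
  if tasks = [] then 0
  else if n = 0 then (tasks.length : Int)
  else
    let counter : PySem.Dict String Int := PySem.Dict.counter tasks
    let frequencies : List Int := counter.values
    -- max(frequencies): Python raises on an empty list; unreachable here since tasks ≠ []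
    match PySem.List.max? frequencies (fun x => x) with
    | none => 0
    | some max_freq =>
      -- sum(1 for freq in frequencies if freq == max_freq)
      let num_max : Int := frequencies.foldl (fun acc freq => if freq = max_freq then acc + 1 else acc) 0
      let min_slots : Int := (max_freq - 1) * (n + 1) + num_max
      max (tasks.length : Int) min_slots

-- ===== PORT B =====
def calculate_minimum_slots_alt (tasks : List String) (n : Int) : Int :=
  let counts : PySem.Dict String Int :=
    tasks.foldl (fun d t => d.insert t (d.getD t 0 + 1)) PySem.Dict.empty
  if counts.size = 0 then 0
  else
    -- max(counts.values()): nonempty here since counts is nonempty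
    match PySem.List.max? counts.values (fun x => x) with
    | none => 0
    | some max_freq =>
      let idle : Int :=
        counts.values.foldl (fun acc c => acc - min c (max_freq - 1)) ((max_freq - 1) * (n + 1))
      (tasks.length : Int) + max 0 idle

-- ===== PRECONDITION & SPEC =====
def Spec_calculate_minimum_slots (tasks : List String) (n : Int) (out : Int) : Prop := out = calculate_minimum_slots_alt tasks n
instance (tasks : List String) (n : Int) (out : Int) : Decidable (Spec_calculate_minimum_slots tasks n out) := by unfold Spec_calculate_minimum_slots; infer_instance

-- ===== CLAIM (what is proved, stated in full; the proofs are below) =====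
def Claim_equal_calculate_minimum_slots : Prop := ∀ (tasks : List String) (n : Int), Dom_calculate_minimum_slots tasks n → Spec_calculate_minimum_slots tasks n (calculate_minimum_slots tasks n)

-- ===== LEMMAS AND PROOFS =====

-- B's subtracting fold peels off the sum of min c (M-1)
lemma foldl_sub_min (M : Int) (l : List Int) (init : Int) :
    l.foldl (fun acc c => acc - min c (M - 1)) init
      = init - (l.map (fun c => min c (M - 1))).sum := by
  induction l generalizing init with
  | nil => simp
  | cons c t ih => simp only [List.foldl_cons, List.map_cons, List.sum_cons, ih]; ring

-- when every element is ≤ M, capping at M-1 loses exactly one unit per copy of M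
lemma sum_map_min_eq (M : Int) (l : List Int) (h : ∀ c ∈ l, c ≤ M) :
    (l.map (fun c => min c (M - 1))).sum = l.sum - (l.countP (fun c => decide (c = M)) : Int) := by
  induction l with
  | nil => simp
  | cons c t ih =>
    have hc := h c List.mem_cons_self
    have ht := ih (fun x hx => h x (List.mem_cons_of_mem _ hx))
    simp only [List.map_cons, List.sum_cons, List.countP_cons, ht]
    by_cases hcM : c = M
    · simp only [hcM, decide_true, if_pos]
      push_cast
      omega
    · have hmin : min c (M - 1) = c := by omega
      simp only [hcM, decide_false, Bool.false_eq_true, if_false, hmin]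
      push_cast
      ring

-- the count of the maximum contributes at least count·M to the sum when all elements are ≥ 1
lemma countP_mul_le_sum (M : Int) (l : List Int)
    (h1 : ∀ c ∈ l, 1 ≤ c) (hM : 1 ≤ M) (hle : ∀ c ∈ l, c ≤ M) :
    (l.countP (fun c => decide (c = M)) : Int) * M ≤ l.sum := by
  induction l with
  | nil => simp
  | cons c t ih =>
    have hc1 := h1 c List.mem_cons_self
    have ih' := ih (fun x hx => h1 x (List.mem_cons_of_mem _ hx))
      (fun x hx => hle x (List.mem_cons_of_mem _ hx))
    by_cases hcM : c = M
    · subst hcM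
      simp only [List.countP_cons, List.sum_cons, decide_true, if_pos]
      push_cast
      linarith
    · simp only [List.countP_cons, List.sum_cons, decide_eq_true_eq, if_neg hcM]
      push_cast
      linarith

-- values of the counter of xs, explicitly
lemma values_counter (xs : List String) :
    (PySem.Dict.counter xs).values
      = (PySem.Set.ofList xs : List String).map (fun k => (xs.count k : Int)) := by
  have h := PySem.Dict.items_counter xs
  simp only [PySem.Dict.values, h, List.map_map]
  rfl

-- sum of the counter's values is the length of the list
lemma sum_values_counter (xs : List String) :
    ((PySem.Dict.counter xs).values).sum = (xs.length : Int) := by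
  rw [values_counter]
  have hperm : (PySem.Set.ofList xs : List String).Perm xs.dedup := by
    rw [List.perm_ext_iff_of_nodup (PySem.Set.nodup_ofList xs) (List.nodup_dedup xs)]
    intro a
    rw [PySem.Set.mem_ofList, List.mem_dedup]
  rw [(hperm.map (fun k => (xs.count k : Int))).sum_eq]
  have hnat : ((xs.dedup.map (fun k => (xs.count k : Nat))).sum : Int)
      = (xs.dedup.map (fun k => (xs.count k : Int))).sum := by
    induction xs.dedup with
    | nil => simp
    | cons a t ih => simp [ih]
  rw [← hnat]
  have h := List.sum_map_count_dedup_eq_length xs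
  simp only [List.count] at h ⊢
  rw [h]

-- every value of the counter is at least 1
lemma one_le_values_counter (xs : List String) :
    ∀ c ∈ (PySem.Dict.counter xs).values, 1 ≤ c := by
  rw [values_counter]
  intro c hc
  rcases List.mem_map.mp hc with ⟨k, hk, rfl⟩
  have hkx : k ∈ xs := (PySem.Set.mem_ofList xs k).mp hk
  have : 1 ≤ xs.count k := List.count_pos_iff.mpr hkx
  exact_mod_cast this

-- ===== VERDICT (by name: the statement is the Claim_ definition above) =====
theorem calculate_minimum_slots_spec : Claim_equal_calculate_minimum_slots := by
  intro tasks n _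
  unfold Spec_calculate_minimum_slots calculate_minimum_slots calculate_minimum_slots_alt
  rw [PySem.Dict.foldl_insert_getD_add_one_eq_counter]
  by_cases hnil : tasks = []
  · subst hnil; simp [PySem.Dict.counter, PySem.Dict.size, PySem.Dict.empty]
  · have hsz : (PySem.Dict.counter tasks).size ≠ 0 := by
      simp only [PySem.Dict.size]
      rw [PySem.Dict.items_counter]
      simp only [List.length_map, ne_eq, List.length_eq_zero_iff]
      intro h
      rcases List.exists_mem_of_ne_nil tasks hnil with ⟨x, hx⟩
      have h2 := (PySem.Set.mem_ofList tasks x).mpr hx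
      rw [h] at h2
      simp at h2
    have hvne : (PySem.Dict.counter tasks).values ≠ [] := by
      intro h
      apply hsz
      simp only [PySem.Dict.size, PySem.Dict.values] at *
      simpa using congrArg List.length h
    rcases hmax : PySem.List.max? (PySem.Dict.counter tasks).values (fun x => x) with _ | M
    · exact absurd ((PySem.List.max?_eq_none_iff _ _).mp hmax) hvne
    · have hMmem : M ∈ (PySem.Dict.counter tasks).values := PySem.List.max?_mem hmax
      have hMle : ∀ c ∈ (PySem.Dict.counter tasks).values, c ≤ M := PySem.List.max?_isMax hmax
      have h1 : ∀ c ∈ (PySem.Dict.counter tasks).values, 1 ≤ c := one_le_values_counter tasks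
      have hM1 : 1 ≤ M := h1 M hMmem
      have hkpos : 1 ≤ (((PySem.Dict.counter tasks).values).countP (fun c => decide (c = M)) : Int) := by
        have h : 0 < ((PySem.Dict.counter tasks).values).countP (fun c => decide (c = M)) :=
          List.countP_pos_iff.mpr ⟨M, hMmem, by simp⟩
        exact_mod_cast h
      have hnum : ((PySem.Dict.counter tasks).values).foldl
          (fun acc freq => if freq = M then acc + 1 else acc) 0
          = (((PySem.Dict.counter tasks).values).countP (fun c => decide (c = M)) : Int) := by
        have h := PySem.List.foldl_count_if (fun c => decide (c = M)) (PySem.Dict.counter tasks).values 0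
        simpa using h
      have hidle : ((PySem.Dict.counter tasks).values).foldl
          (fun acc c => acc - min c (M - 1)) ((M - 1) * (n + 1))
          = (M - 1) * (n + 1) - ((tasks.length : Int)
              - (((PySem.Dict.counter tasks).values).countP (fun c => decide (c = M)) : Int)) := by
        rw [foldl_sub_min, sum_map_min_eq M _ hMle, sum_values_counter]
      have hkM : (((PySem.Dict.counter tasks).values).countP (fun c => decide (c = M)) : Int) * M
          ≤ (tasks.length : Int) := by
        rw [← sum_values_counter tasks]
        exact countP_mul_le_sum M _ h1 hM1 hMle
      simp only [if_neg hnil, if_neg hsz, hmax, hnum, hidle]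
      generalize hkg : (((PySem.Dict.counter tasks).values).countP (fun c => decide (c = M)) : Int) = k
        at hkpos hkM ⊢
      by_cases hn : n = 0
      · subst hn
        have hprod : k + M - 1 ≤ k * M := by nlinarith
        omega
      · simp only [if_neg hn]
        generalize (M - 1) * (n + 1) = F
        omega
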